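-- pv_equiv track=rewrite | github.com/fbuckhold3/Project-Z | daily_scheduler.py | generate_mariokart_schedule
-- ===== SOURCE A (Python) =====
-- def generate_mariokart_schedule(n_teams, n_days, days_off_per_turn,
--                                 max_consec_days):
--     """Generate the MarioKart day-off pattern.
--
--     n_teams: total teams (e.g. 5 for SLUH)
--     n_days: total days in block (e.g. 21 for 3-week)
--     days_off_per_turn: consecutive days off per team (default 2)
--     max_consec_days: max consecutive working days (default 8)
--
--     Returns: list of length n_days, each element is list of team indices that are OFF.
--     Also returns: dict team_idx -> list of booleans (True=working, False=off)
--     """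
--     # Cycle length: each team gets days_off_per_turn days off, then next team
--     cycle_len = n_teams * days_off_per_turn
--
--     team_working = {t: [True] * n_days for t in range(n_teams)}
--     daily_off = [[] for _ in range(n_days)]
--
--     for day in range(n_days):
--         # Which team is off?
--         pos_in_cycle = day % cycle_len
--         off_team = pos_in_cycle // days_off_per_turn
--         off_team = off_team % n_teams
--         team_working[off_team][day] = False
--         daily_off[day].append(off_team)
--
--     # Verify max consecutive constraint
--     for t in range(n_teams):
--         consec = 0
--         max_c = 0
--         for day in range(n_days):
--             if team_working[t][day]:
--                 consec += 1
--                 max_c = max(max_c, consec)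
--             else:
--                 consec = 0
--         # If exceeding max, insert extra off days
--         if max_c > max_consec_days:
--             consec = 0
--             for day in range(n_days):
--                 if team_working[t][day]:
--                     consec += 1
--                     if consec >= max_consec_days:
--                         # Force day off next day if possible
--                         if day + 1 < n_days and team_working[t][day + 1]:
--                             team_working[t][day + 1] = False
--                             daily_off[day + 1].append(t)
--                             consec = 0
--                 else:
--                     consec = 0
--
--     return team_working, daily_off
-- ===== SOURCE B (Python) =====
-- def generate_mariokart_schedule(n_teams, n_days, days_off_per_turn,
--                                 max_consec_days):
--     """Same schedule computed without simulating the consec counter: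
--     forced off-days are the arithmetic progression step, 2*step+1, ...
--     inside each maximal working run (step = max(max_consec_days, 1))."""
--     cycle_len = n_teams * days_off_per_turn
--
--     daily_off = [[(d % cycle_len) // days_off_per_turn % n_teams]
--                  for d in range(n_days)]
--
--     team_working = {}
--     for t in range(n_teams):
--         w = [(d % cycle_len) // days_off_per_turn % n_teams != t
--              for d in range(n_days)]
--         # maximal working runs as (start, length) pairs
--         runs = []
--         start = None
--         for d, x in enumerate(w):
--             if x:
--                 if start is None:
--                     start = d
--             else:
--                 if start is not None:
--                     runs.append((start, d - start))
--                     start = None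
--         if start is not None:
--             runs.append((start, n_days - start))
--         if runs and max(L for _, L in runs) > max_consec_days:
--             step = max(max_consec_days, 1)
--             for s, L in runs:
--                 p = step
--                 while p < L:
--                     w[s + p] = False
--                     daily_off[s + p].append(t)
--                     p += step + 1
--         team_working[t] = w
--     return team_working, daily_off
-- ===== Notes on version B (the rewrite author's own statement) =====
-- stated objective: alternative
-- what changed: B never simulates A's consec counter: it builds daily_off and each team's row directly from the cycle formula, decomposes the row into maximal working runs (start,length), gates on the maximum run length, and marks the forced off-days as the closed-form arithmetic progression step, 2*step+1, 3*step+2, ... inside each run (step = max(max_consec_days,1)), instead of A's stateful day-by-day forcing loop.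
import Mathlib
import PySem

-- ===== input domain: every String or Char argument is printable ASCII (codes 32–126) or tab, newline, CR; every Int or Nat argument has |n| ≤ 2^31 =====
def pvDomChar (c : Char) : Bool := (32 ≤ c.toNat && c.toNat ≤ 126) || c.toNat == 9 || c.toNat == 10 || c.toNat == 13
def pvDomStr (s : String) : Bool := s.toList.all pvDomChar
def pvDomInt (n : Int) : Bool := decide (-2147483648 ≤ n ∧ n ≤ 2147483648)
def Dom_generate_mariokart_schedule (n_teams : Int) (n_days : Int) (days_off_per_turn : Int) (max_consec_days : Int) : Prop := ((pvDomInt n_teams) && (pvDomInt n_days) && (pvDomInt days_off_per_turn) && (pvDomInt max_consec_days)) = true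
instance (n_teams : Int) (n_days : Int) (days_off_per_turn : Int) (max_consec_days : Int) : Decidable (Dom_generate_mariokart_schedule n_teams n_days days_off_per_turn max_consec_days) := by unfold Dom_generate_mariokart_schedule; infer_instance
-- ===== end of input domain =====

-- B replaces A's stateful consec-counter forcing pass: it decomposes each team's row into
-- maximal working runs and marks the forced off-days as the closed-form arithmetic
-- progression step, 2*step+1, ... inside each run (objective: alternative, same cost).

-- ===== PORT A =====
-- body of A's forcing loop (state: team_working dict × daily_off × consec; Python mutates
-- the dict's list in place, rendered as read-modify-insert at the same key)
def pvForceStep (n_days : Int) (max_consec_days : Int) (t : Int)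
    (q : PySem.Dict Int (List Bool) × List (List Int) × Int) (day : Int) :
    PySem.Dict Int (List Bool) × List (List Int) × Int :=
  if PySem.List.pyGetD (q.1.getD t []) day false then
    let consec := q.2.2 + 1
    if consec ≥ max_consec_days then
      if day + 1 < n_days ∧ PySem.List.pyGetD (q.1.getD t []) (day + 1) false then
        (q.1.insert t (PySem.List.pySetD (q.1.getD t []) (day + 1) false),
         PySem.List.pySetD q.2.1 (day + 1) (PySem.List.pyGetD q.2.1 (day + 1) [] ++ [t]),
         0)
      else (q.1, q.2.1, consec)
    else (q.1, q.2.1, consec)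
  else (q.1, q.2.1, 0)

def pvForce (n_days : Int) (max_consec_days : Int) (t : Int)
    (tw : PySem.Dict Int (List Bool)) (doff : List (List Int)) :
    PySem.Dict Int (List Bool) × List (List Int) × Int :=
  (PySem.List.pyRange 0 n_days 1).foldl (pvForceStep n_days max_consec_days t) (tw, doff, 0)

-- body of A's day loop: team_working[off_team][day] = False; daily_off[day].append(off_team)
def pvADayStep (n_teams : Int) (days_off_per_turn : Int)
    (st : PySem.Dict Int (List Bool) × List (List Int)) (day : Int) :
    PySem.Dict Int (List Bool) × List (List Int) :=
  let cycle_len := n_teams * days_off_per_turn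
  let pos_in_cycle := PySem.Int.mod day cycle_len
  let off_team := PySem.Int.mod (PySem.Int.floordiv pos_in_cycle days_off_per_turn) n_teams
  (st.1.insert off_team (PySem.List.pySetD (st.1.getD off_team []) day false),
   PySem.List.pySetD st.2 day (PySem.List.pyGetD st.2 day [] ++ [off_team]))

-- body of A's verification loop over teams: counter/max scan, then the forcing loop
def pvAStep (n_days : Int) (max_consec_days : Int)
    (st : PySem.Dict Int (List Bool) × List (List Int)) (t : Int) :
    PySem.Dict Int (List Bool) × List (List Int) :=
  let scan := (PySem.List.pyRange 0 n_days 1).foldl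
    (fun (p : Int × Int) day =>
      if PySem.List.pyGetD (st.1.getD t []) day false then (p.1 + 1, max p.2 (p.1 + 1))
      else (0, p.2))
    (0, 0)
  if scan.2 > max_consec_days then
    let f := pvForce n_days max_consec_days t st.1 st.2
    (f.1, f.2.1)
  else st

def generate_mariokart_schedule (n_teams : Int) (n_days : Int) (days_off_per_turn : Int) (max_consec_days : Int) : (List (Int × List Bool)) × List (List Int) :=
  let team_working : PySem.Dict Int (List Bool) :=
    (PySem.List.pyRange 0 n_teams 1).foldl
      (fun d t => d.insert t (List.replicate n_days.toNat true)) PySem.Dict.empty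
  let daily_off : List (List Int) := List.replicate n_days.toNat []
  let st1 := (PySem.List.pyRange 0 n_days 1).foldl
    (pvADayStep n_teams days_off_per_turn) (team_working, daily_off)
  let st2 := (PySem.List.pyRange 0 n_teams 1).foldl (pvAStep n_days max_consec_days) st1
  (st2.1.items, st2.2)

-- ===== PORT B =====
-- the off-team expression of Source B's two comprehensions: (d % cycle_len) // days_off_per_turn % n_teams
def pvOffTeam (n_teams : Int) (days_off_per_turn : Int) (day : Int) : Int :=
  PySem.Int.mod
    (PySem.Int.floordiv (PySem.Int.mod day (n_teams * days_off_per_turn)) days_off_per_turn)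
    n_teams

-- Source B's row comprehension for team t
def pvWRow (n_teams : Int) (n_days : Int) (days_off_per_turn : Int) (t : Int) : List Bool :=
  (PySem.List.pyRange 0 n_days 1).map
    (fun d => decide (pvOffTeam n_teams days_off_per_turn d ≠ t))

-- Source B's run scan: body of 'for d, x in enumerate(w)' with state (runs, start)
def pvScanStep (st : List (Int × Int) × Option Int) (dx : Int × Bool) :
    List (Int × Int) × Option Int :=
  if dx.2 then
    match st.2 with
    | none => (st.1, some dx.1)
    | some s => (st.1, some s)
  else
    match st.2 with
    | none => (st.1, none)
    | some s => (st.1 ++ [(s, dx.1 - s)], none)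

-- the scan plus the trailing 'if start is not None' flush
def pvRunsOf (w : List Bool) (n_days : Int) : List (Int × Int) :=
  let st := (PySem.List.enumerate w 0).foldl pvScanStep ([], none)
  match st.2 with
  | some s => st.1 ++ [(s, n_days - s)]
  | none => st.1

-- Source B's while loop: 'p = step; while p < L: mark s+p; p += step + 1' (step = max(max_consec_days,1))
def pvProg (t : Int) (max_consec_days : Int) (s : Int) (L : Int)
    (wd : List Bool × List (List Int)) (p : Int) : List Bool × List (List Int) :=
  if p < L then
    pvProg t max_consec_days s L
      (PySem.List.pySetD wd.1 (s + p) false,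
       PySem.List.pySetD wd.2 (s + p) (PySem.List.pyGetD wd.2 (s + p) [] ++ [t]))
      (p + max max_consec_days 1 + 1)
  else wd
  termination_by (L - p).toNat
  decreasing_by
    have := le_max_right max_consec_days 1
    omega

-- body of Source B's team loop
def pvBTeam (n_teams : Int) (n_days : Int) (days_off_per_turn : Int) (max_consec_days : Int)
    (st : PySem.Dict Int (List Bool) × List (List Int)) (t : Int) :
    PySem.Dict Int (List Bool) × List (List Int) :=
  let w := pvWRow n_teams n_days days_off_per_turn t
  let runs := pvRunsOf w n_days
  match PySem.List.max? (runs.map Prod.snd) (fun x => x) with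
  | some mx =>
    if mx > max_consec_days then
      let fin := runs.foldl
        (fun wd r => pvProg t max_consec_days r.1 r.2 wd (max max_consec_days 1))
        (w, st.2)
      (st.1.insert t fin.1, fin.2)
    else (st.1.insert t w, st.2)
  | none => (st.1.insert t w, st.2)

def generate_mariokart_schedule_alt (n_teams : Int) (n_days : Int) (days_off_per_turn : Int) (max_consec_days : Int) : (List (Int × List Bool)) × List (List Int) :=
  let daily_off : List (List Int) :=
    (PySem.List.pyRange 0 n_days 1).map (fun d => [pvOffTeam n_teams days_off_per_turn d])
  let st := (PySem.List.pyRange 0 n_teams 1).foldl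
    (pvBTeam n_teams n_days days_off_per_turn max_consec_days)
    (PySem.Dict.empty, daily_off)
  (st.1.items, st.2)

-- ===== PRECONDITION & SPEC =====
-- Exactly the inputs on which the Python A returns: with at least one day, A raises
-- ZeroDivisionError when n_teams * days_off_per_turn == 0 and KeyError when n_teams < 0
-- (off_team % n_teams is then not a dict key); with n_days ≤ 0 it always returns.
def Pre_generate_mariokart_schedule (n_teams : Int) (n_days : Int) (days_off_per_turn : Int) (max_consec_days : Int) : Prop :=
  n_days ≤ 0 ∨ (1 ≤ n_teams ∧ days_off_per_turn ≠ 0)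
instance (n_teams : Int) (n_days : Int) (days_off_per_turn : Int) (max_consec_days : Int) : Decidable (Pre_generate_mariokart_schedule n_teams n_days days_off_per_turn max_consec_days) := by unfold Pre_generate_mariokart_schedule; infer_instance

def pvWitness_generate_mariokart_schedule : Int × Int × Int × Int := (3, 21, 2, 8)

def Spec_generate_mariokart_schedule (n_teams : Int) (n_days : Int) (days_off_per_turn : Int) (max_consec_days : Int) (out : (List (Int × List Bool)) × List (List Int)) : Prop := out = generate_mariokart_schedule_alt n_teams n_days days_off_per_turn max_consec_days
instance (n_teams : Int) (n_days : Int) (days_off_per_turn : Int) (max_consec_days : Int) (out : (List (Int × List Bool)) × List (List Int)) : Decidable (Spec_generate_mariokart_schedule n_teams n_days days_off_per_turn max_consec_days out) := by unfold Spec_generate_mariokart_schedule; infer_instance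

-- ===== CLAIM (what is proved, stated in full; the proofs are below) =====
def Claim_equal_generate_mariokart_schedule : Prop := ∀ (n_teams : Int) (n_days : Int) (days_off_per_turn : Int) (max_consec_days : Int), Dom_generate_mariokart_schedule n_teams n_days days_off_per_turn max_consec_days → Pre_generate_mariokart_schedule n_teams n_days days_off_per_turn max_consec_days → Spec_generate_mariokart_schedule n_teams n_days days_off_per_turn max_consec_days (generate_mariokart_schedule n_teams n_days days_off_per_turn max_consec_days)

-- ===== LEMMAS AND PROOFS =====

-- countdown view of the forcing pass: p = max_consec_days - consec; returns the
-- transformed row and the (relative) indices of the forced-off days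
def pvF (m : Int) : List Bool → Int → List Bool × List Nat
  | [], _ => ([], [])
  | false :: r, _ => (false :: (pvF m r m).1, (pvF m r m).2.map (· + 1))
  | true :: r, p =>
    if p ≤ 1 then
      match r with
      | true :: r' => (true :: false :: (pvF m r' m).1, 1 :: (pvF m r' m).2.map (· + 2))
      | [] => (true :: (pvF m ([] : List Bool) (p - 1)).1,
               (pvF m ([] : List Bool) (p - 1)).2.map (· + 1))
      | false :: r' => (true :: (pvF m (false :: r') (p - 1)).1,
                        (pvF m (false :: r') (p - 1)).2.map (· + 1))
    else (true :: (pvF m r (p - 1)).1, (pvF m r (p - 1)).2.map (· + 1))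
  termination_by l _ => l.length
  decreasing_by all_goals (simp only [List.length_cons, List.length_nil]; omega)


theorem pvF_nil (m p : Int) : pvF m [] p = ([], []) := by rw [pvF]
theorem pvF_false (m p : Int) (r : List Bool) :
    pvF m (false :: r) p = (false :: (pvF m r m).1, (pvF m r m).2.map (· + 1)) := by rw [pvF]
theorem pvF_force (m p : Int) (r' : List Bool) (hp : p ≤ 1) :
    pvF m (true :: true :: r') p
    = (true :: false :: (pvF m r' m).1, 1 :: (pvF m r' m).2.map (· + 2)) := by
  rw [pvF, if_pos hp]
theorem pvF_true_one (m p : Int) (hp : p ≤ 1) : pvF m [true] p = ([true], []) := by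
  rw [pvF, if_pos hp]; simp [pvF]
theorem pvF_true_false (m p : Int) (r' : List Bool) (hp : p ≤ 1) :
    pvF m (true :: false :: r') p
    = (true :: (pvF m (false :: r') (p - 1)).1, (pvF m (false :: r') (p - 1)).2.map (· + 1)) := by
  simp [pvF, hp]
theorem pvF_true_big (m p : Int) (r : List Bool) (hp : ¬ p ≤ 1) :
    pvF m (true :: r) p = (true :: (pvF m r (p - 1)).1, (pvF m r (p - 1)).2.map (· + 1)) := by
  rw [pvF.eq_def]
  simp only [if_neg hp]

-- append t at index i of daily_off
def pvAppendAt (t : Int) (doff : List (List Int)) (i : Int) : List (List Int) :=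
  PySem.List.pySetD doff i (PySem.List.pyGetD doff i [] ++ [t])

-- A's counter/max scan as a fold over the list itself
def pvScan (w : List Bool) (p : Int × Int) : Int × Int :=
  w.foldl (fun p b => if b then (p.1 + 1, max p.2 (p.1 + 1)) else (0, p.2)) p

-- per-team result shared by both sides
def pvTeamRes (m t : Int) (w : List Bool) (doff : List (List Int)) :
    List Bool × List (List Int) :=
  if (pvScan w (0, 0)).2 > m then
    ((pvF m w m).1, (pvF m w m).2.foldl (fun d (i : Nat) => pvAppendAt t d (i : Int)) doff)
  else (w, doff)

-- the whole team loop, threaded over daily_off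
def pvFinal (n_teams n_days days_off_per_turn m : Int) :
    List Int → List (List Int) → List (Int × List Bool) × List (List Int)
  | [], doff => ([], doff)
  | t :: ts, doff =>
    let r := pvTeamRes m t (pvWRow n_teams n_days days_off_per_turn t) doff
    let rest := pvFinal n_teams n_days days_off_per_turn m ts r.2
    ((t, r.1) :: rest.1, rest.2)

theorem pvScan_nil (p : Int × Int) : pvScan [] p = p := rfl
theorem pvScan_cons (b : Bool) (w : List Bool) (p : Int × Int) :
    pvScan (b :: w) p = pvScan w (if b then (p.1 + 1, max p.2 (p.1 + 1)) else (0, p.2)) := rfl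

def pvLead : List Bool → Nat
  | true :: r => pvLead r + 1
  | _ => 0

def pvLens : List Bool → List Int
  | [] => []
  | false :: r => pvLens r
  | true :: r => (1 + (pvLead r : Int)) :: pvLens (r.drop (pvLead r))
  termination_by l => l.length
  decreasing_by all_goals (simp; try omega)

-- structural maximal-run list (start, length)
def pvRuns : List Bool → Int → List (Int × Int)
  | [], _ => []
  | false :: r, k => pvRuns r (k + 1)
  | true :: r, k =>
    (k, 1 + (pvLead r : Int)) :: pvRuns (r.drop (pvLead r)) (k + 1 + (pvLead r : Int))
  termination_by l _ => l.length
  decreasing_by all_goals (simp; try omega)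

-- jump view of one run: mark positions p, p+(max m 1)+1, ... of a block of L Trues
def pvApply (m : Int) : Nat → Int → List Bool × List Nat
  | L, p =>
    if h : 0 ≤ p ∧ p < L then
      (List.replicate p.toNat true ++
        false :: (pvApply m (L - p.toNat - 1) (max m 1)).1,
       p.toNat :: (pvApply m (L - p.toNat - 1) (max m 1)).2.map (· + (p.toNat + 1)))
    else (List.replicate L true, [])
  termination_by L _ => L
  decreasing_by omega

theorem pvLead_nil : pvLead [] = 0 := rfl
theorem pvLead_false (r : List Bool) : pvLead (false :: r) = 0 := rfl
theorem pvLead_true (r : List Bool) : pvLead (true :: r) = pvLead r + 1 := rfl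

theorem pvScan_snd_nonneg (w : List Bool) : ∀ (c m : Int), 0 ≤ m → 0 ≤ (pvScan w (c, m)).2 := by
  induction w with
  | nil => intro c m h; simpa [pvScan_nil] using h
  | cons b r ih =>
    intro c m h
    rw [pvScan_cons]
    cases b <;> simp <;> apply ih <;> omega

theorem pvScan_snd_max (w : List Bool) : ∀ (c m : Int), 0 ≤ c → c ≤ m →
    (pvScan w (c, m)).2 = max m (pvScan w (c, c)).2 := by
  induction w with
  | nil => intro c m h0 h; simp [pvScan_nil]; omega
  | cons b r ih =>
    intro c m h0 h
    rw [pvScan_cons, pvScan_cons]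
    cases b
    · simp only [Bool.false_eq_true, if_false]
      rw [ih 0 m (le_refl 0) (by omega), ih 0 c (le_refl 0) (by omega)]
      omega
    · simp only [if_true]
      rw [ih (c+1) (max m (c+1)) (by omega) (by omega), ih (c+1) (max c (c+1)) (by omega) (by omega)]
      have h2 := pvScan_snd_nonneg r (c+1) (c+1) (by omega)
      omega

theorem pvDrop_lead (w : List Bool) :
    w.drop (pvLead w) = [] ∨ ∃ s, w.drop (pvLead w) = false :: s := by
  induction w with
  | nil => left; rfl
  | cons b r ih =>
    cases b
    · right; exact ⟨r, rfl⟩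
    · simpa [pvLead_true, pvLead_false] using ih

theorem pvScan_lead (w : List Bool) : ∀ (c m : Int), c ≤ m →
    pvScan w (c, m) = pvScan (w.drop (pvLead w)) (c + pvLead w, max m (c + pvLead w)) := by
  induction w with
  | nil =>
    intro c m h
    simp only [pvLead_nil, List.drop_nil, pvScan_nil, Nat.cast_zero, add_zero, Prod.mk.injEq]
    exact ⟨trivial, by rw [Int.max_eq_left h]⟩
  | cons b r ih =>
    intro c m h
    cases b
    · simp only [pvLead_false, List.drop_zero, Nat.cast_zero, add_zero]
      rw [pvScan_cons, pvScan_cons]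
      simp only [Bool.false_eq_true, if_false]
      rw [Int.max_eq_left h]
    · rw [pvScan_cons]
      simp only [if_true, pvLead_true, List.drop_succ_cons]
      rw [ih (c+1) (max m (c+1)) (by omega)]
      congr 1
      simp only [Prod.mk.injEq]
      constructor <;> push_cast <;> omega

-- max of the run lengths = A's counter/max scan
theorem pvLens_fold_aux : ∀ (n : Nat) (w : List Bool), w.length ≤ n → ∀ (b : Int), 0 ≤ b →
    (pvLens w).foldl max b = max b (pvScan w (0, 0)).2 := by
  intro n
  induction n with
  | zero =>
    intro w hw b hb
    have hw' : w = [] := List.eq_nil_of_length_eq_zero (by omega)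
    subst hw'
    simp only [pvLens, List.foldl_nil, pvScan_nil]
    omega
  | succ n ih =>
    intro w hw b hb
    match w with
    | [] => simp only [pvLens, List.foldl_nil, pvScan_nil]; omega
    | false :: r =>
      rw [pvLens]
      rw [ih r (by simpa using hw) b hb, pvScan_cons]
      simp
    | true :: r =>
      rw [pvLens, List.foldl_cons]
      have hlen : (r.drop (pvLead r)).length ≤ n := by
        have h1 : (r.drop (pvLead r)).length ≤ r.length := by simp
        simp only [List.length_cons] at hw
        omega
      rw [ih _ hlen (max b (1 + (pvLead r : Int))) (by omega)]
      have hre : (true :: r).drop (pvLead (true :: r)) = r.drop (pvLead r) := by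
        rw [pvLead_true, List.drop_succ_cons]
      have hk0 : (0:Int) ≤ (pvLead (true :: r) : Int) := by positivity
      have hscan : (pvScan (true :: r) (0, 0)).2
          = (pvScan (r.drop (pvLead r)) ((pvLead (true :: r) : Int), (pvLead (true :: r) : Int))).2 := by
        conv_lhs => rw [pvScan_lead (true :: r) 0 0 (le_refl 0)]
        rw [zero_add, Int.max_eq_right hk0, hre]
      rw [hscan]
      have hcast : (pvLead (true :: r) : Int) = 1 + (pvLead r : Int) := by
        rw [pvLead_true]; push_cast; ring
      rcases pvDrop_lead r with hnil | ⟨s, hs⟩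
      · rw [hnil, pvScan_nil, pvScan_nil]
        simp only [pvLens, List.foldl_nil]
        omega
      · rw [hs, pvScan_cons, pvScan_cons]
        simp only [Bool.false_eq_true, if_false]
        rw [pvScan_snd_max s 0 (pvLead (true :: r)) (le_refl 0) hk0]
        have hnn := pvScan_snd_nonneg s 0 0 (le_refl 0)
        -- LHS still has foldl over pvLens (r.drop (pvLead r)); rewrite via hs
        rw [hs] at *
        omega

-- if nothing is forced the row is unchanged
theorem pvF_forced_nil (m : Int) : ∀ (w : List Bool) (p : Int),
    (pvF m w p).2 = [] → (pvF m w p).1 = w := by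
  intro w
  induction w with
  | nil => intro p _; simp [pvF_nil]
  | cons b r ih =>
    intro p h
    cases b
    · rw [pvF_false] at h ⊢
      simp only [List.map_eq_nil_iff] at h
      simp [ih m h]
    · by_cases hp : p ≤ 1
      · match r with
        | [] => rw [pvF_true_one m p hp]
        | true :: r' => rw [pvF_force m p r' hp] at h; simp at h
        | false :: r' =>
          rw [pvF_true_false m p r' hp] at h ⊢
          simp only [List.map_eq_nil_iff] at h
          simp [ih (p - 1) h]
      · rw [pvF_true_big m p r hp] at h ⊢
        simp only [List.map_eq_nil_iff] at h
        simp [ih (p - 1) h]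

-- on an all-False row pvF is the identity with no forced days
theorem pvF_all_false (m : Int) : ∀ (w : List Bool) (p : Int),
    (∀ x ∈ w, x = false) → pvF m w p = (w, []) := by
  intro w
  induction w with
  | nil => intro p _; simp [pvF]
  | cons b r ih =>
    intro p h
    have hb : b = false := h b (by simp)
    subst hb
    rw [pvF_false, ih m (fun x hx => h x (by simp [hx]))]
    simp

-- the countdown is irrelevant when the row starts with False (or is empty)
theorem pvF_reset (m : Int) (r : List Bool) (p q : Int)
    (h : r = [] ∨ ∃ r', r = false :: r') : pvF m r p = pvF m r q := by
  rcases h with h | ⟨r', h⟩ <;> subst h <;> simp [pvF_nil, pvF_false]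

-- pvLens w = [] means the row is all False
theorem pvLens_nil_all_false : ∀ (w : List Bool), pvLens w = [] → ∀ x ∈ w, x = false := by
  intro w
  induction w with
  | nil => intro _ x hx; simp at hx
  | cons b r ih =>
    intro h x hx
    cases b
    · rw [pvLens] at h
      rcases List.mem_cons.mp hx with hx | hx
      · exact hx
      · exact ih h x hx
    · rw [pvLens] at h
      simp at h

-- every run length is ≥ 1
theorem pvLens_pos : ∀ (w : List Bool), ∀ L ∈ pvLens w, 1 ≤ L := by
  intro w
  induction w using pvLens.induct with
  | case1 => intro L hL; simp [pvLens] at hL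
  | case2 r ih =>
    intro L hL
    rw [pvLens] at hL
    exact ih L hL
  | case3 r ih =>
    intro L hL
    rw [pvLens] at hL
    rcases List.mem_cons.mp hL with h | h
    · subst h; omega
    · exact ih L h


theorem pvApply_pos (m : Int) (L : Nat) (p : Int) (h : 0 ≤ p ∧ p < L) :
    pvApply m L p
    = (List.replicate p.toNat true ++ false :: (pvApply m (L - p.toNat - 1) (max m 1)).1,
       p.toNat :: (pvApply m (L - p.toNat - 1) (max m 1)).2.map (· + (p.toNat + 1))) := by
  rw [pvApply, dif_pos h]

theorem pvApply_neg (m : Int) (L : Nat) (p : Int) (h : ¬(0 ≤ p ∧ p < L)) :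
    pvApply m L p = (List.replicate L true, []) := by
  rw [pvApply, dif_neg h]

theorem pvApply_len (m : Int) : ∀ (L : Nat) (p : Int), (pvApply m L p).1.length = L := by
  intro L
  induction L using Nat.strong_induction_on with
  | _ L ih =>
    intro p
    by_cases h : 0 ≤ p ∧ p < L
    · rw [pvApply_pos m L p h]
      simp only [List.length_append, List.length_replicate, List.length_cons]
      rw [ih (L - p.toNat - 1) (by omega) (max m 1)]
      omega
    · rw [pvApply_neg m L p h]
      simp

theorem pvMapAdd (Y : List Nat) (a b : Nat) :
    (Y.map (· + a)).map (· + b) = Y.map (· + (a + b)) := by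
  rw [List.map_map]
  apply List.map_congr_left
  intro i _
  simp [Nat.add_assoc]

theorem pvApply_cons (m : Int) (L : Nat) (p : Int) (hp : 2 ≤ p) :
    pvApply m (L + 1) p
    = (true :: (pvApply m L (p - 1)).1, (pvApply m L (p - 1)).2.map (· + 1)) := by
  by_cases h : p < (L + 1 : Nat)
  · rw [pvApply_pos m (L + 1) p ⟨by omega, h⟩,
      pvApply_pos m L (p - 1) ⟨by omega, by push_cast at h ⊢; omega⟩]
    have h1 : p.toNat = (p - 1).toNat + 1 := by omega
    rw [h1]
    have h2 : L + 1 - ((p - 1).toNat + 1) - 1 = L - (p - 1).toNat - 1 := by omega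
    rw [h2]
    rw [Prod.mk.injEq]
    constructor
    · simp [List.replicate_succ]
    · simp only [List.map_cons]
      rw [pvMapAdd]
  · rw [pvApply_neg m (L + 1) p (by omega), pvApply_neg m L (p - 1) (by push_cast at h ⊢; omega)]
    simp [List.replicate_succ]

-- forcing a block of L Trues followed by a False boundary is the arithmetic-progression jump
theorem pvF_run (m : Int) : ∀ (L : Nat) (r : List Bool) (p : Int),
    (r = [] ∨ ∃ r', r = false :: r') →
    pvF m (List.replicate L true ++ r) p
    = ((pvApply m L (max p 1)).1 ++ (pvF m r m).1,
       (pvApply m L (max p 1)).2 ++ (pvF m r m).2.map (· + L)) := by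
  intro L
  induction L using Nat.strong_induction_on with
  | _ L ih =>
    intro r p hr
    match L with
    | 0 =>
      rw [pvApply_neg m 0 (max p 1) (by omega)]
      simp only [List.replicate_zero, List.nil_append, List.append_nil, Nat.add_zero]
      rw [pvF_reset m r p m hr]
      simp
    | 1 =>
      have hap : pvApply m 1 (max p 1) = ([true], []) := by
        rw [pvApply_neg m 1 (max p 1) (by omega)]
        simp
      rw [hap]
      simp only [List.replicate_succ, List.replicate_zero, List.cons_append, List.nil_append]
      by_cases hp : p ≤ 1
      · rcases hr with h | ⟨r', h⟩ <;> subst h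
        · simp [pvF_true_one m p hp, pvF_nil]
        · simp [pvF_true_false m p r' hp, pvF_reset m (false :: r') (p - 1) m (by simp)]
      · simp [pvF_true_big m p r hp, pvF_reset m r (p - 1) m hr]
    | (L + 2) =>
      have hlist : List.replicate (L + 2) true ++ r
          = true :: true :: (List.replicate L true ++ r) := by
        simp [List.replicate_succ]
      rw [hlist]
      by_cases hp : p ≤ 1
      · rw [pvF_force m p (List.replicate L true ++ r) hp]
        rw [ih L (by omega) r m hr]
        have hm1 : max p 1 = 1 := by omega
        rw [hm1, pvApply_pos m (L + 2) 1 ⟨by omega, by omega⟩]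
        have hL : L + 2 - (1 : Int).toNat - 1 = L := by omega
        rw [hL]
        rw [Prod.mk.injEq]
        constructor
        · simp [List.replicate_succ]
        · simp only [Int.toNat_one, List.map_append, List.cons_append, List.cons.injEq, true_and]
          rw [pvMapAdd]
      · rw [pvF_true_big m p (true :: (List.replicate L true ++ r)) hp]
        rw [show (true :: (List.replicate L true ++ r)) = List.replicate (L + 1) true ++ r by
          simp [List.replicate_succ]]
        rw [ih (L + 1) (by omega) r (p - 1) hr]
        have hm1 : max p 1 = p := by omega
        have hm2 : max (p - 1) 1 = p - 1 := by omega
        rw [hm1, hm2]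
        rw [show (L + 2) = (L + 1) + 1 from rfl, pvApply_cons m (L + 1) p (by omega)]
        rw [Prod.mk.injEq]
        constructor
        · simp
        · simp only [List.map_append, List.cons.injEq, true_and]
          rw [pvMapAdd]


-- indexing/writing at the boundary of a known prefix
theorem pvGetD_mid {α : Type} (pre : List α) (x : α) (r : List α) (k : Int) (d : α)
    (h0 : 0 ≤ k) (hl : pre.length = k.toNat) :
    PySem.List.pyGetD (pre ++ x :: r) k d = x := by
  rw [PySem.List.pyGetD_eq_getElem _ d h0 (by simp; omega)]
  rw [List.getElem_append_right (by omega)]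
  simp [hl]

theorem pvSet_mid {α : Type} : ∀ (pre : List α) (x v : α) (r : List α),
    (pre ++ x :: r).set pre.length v = pre ++ v :: r := by
  intro pre
  induction pre with
  | nil => intro x v r; rfl
  | cons a pre ih => intro x v r; simp [List.set_cons_succ, ih]

theorem pvSetD_mid {α : Type} (pre : List α) (x v : α) (r : List α) (k : Int)
    (h0 : 0 ≤ k) (hl : pre.length = k.toNat) :
    PySem.List.pySetD (pre ++ x :: r) k v = pre ++ v :: r := by
  rw [PySem.List.pySetD_of_nonneg _ _ h0, ← hl, pvSet_mid]

-- step-evaluation lemmas for A's forcing loop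
theorem pvForceStep_false (n m t : Int) (tw : PySem.Dict Int (List Bool))
    (doff : List (List Int)) (c day : Int)
    (h : PySem.List.pyGetD (tw.getD t []) day false = false) :
    pvForceStep n m t (tw, doff, c) day = (tw, doff, 0) := by
  simp [pvForceStep, h]

theorem pvForceStep_force (n m t : Int) (tw : PySem.Dict Int (List Bool))
    (doff : List (List Int)) (c day : Int)
    (h1 : PySem.List.pyGetD (tw.getD t []) day false = true)
    (h2 : c + 1 ≥ m) (h3 : day + 1 < n)
    (h4 : PySem.List.pyGetD (tw.getD t []) (day + 1) false = true) :
    pvForceStep n m t (tw, doff, c) day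
    = (tw.insert t (PySem.List.pySetD (tw.getD t []) (day + 1) false),
       pvAppendAt t doff (day + 1), 0) := by
  simp [pvForceStep, h1, h2, h3, h4, pvAppendAt]

theorem pvForceStep_noforce (n m t : Int) (tw : PySem.Dict Int (List Bool))
    (doff : List (List Int)) (c day : Int)
    (h1 : PySem.List.pyGetD (tw.getD t []) day false = true)
    (h34 : ¬(day + 1 < n ∧ PySem.List.pyGetD (tw.getD t []) (day + 1) false = true)) :
    pvForceStep n m t (tw, doff, c) day = (tw, doff, c + 1) := by
  by_cases h2 : c + 1 ≥ m
  · simp only [pvForceStep, h1, if_true]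
    rw [if_pos h2, if_neg (by simpa using h34)]
  · simp only [pvForceStep, h1, if_true]
    rw [if_neg h2]

theorem pvForceStep_small (n m t : Int) (tw : PySem.Dict Int (List Bool))
    (doff : List (List Int)) (c day : Int)
    (h1 : PySem.List.pyGetD (tw.getD t []) day false = true)
    (h2 : ¬(c + 1 ≥ m)) :
    pvForceStep n m t (tw, doff, c) day = (tw, doff, c + 1) := by
  simp only [pvForceStep, h1, if_true]
  rw [if_neg h2]

-- the two 'combine' helpers of the induction
theorem pvCombine (tw : PySem.Dict Int (List Bool)) (t : Int) (pre : List Bool) (b : Bool)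
    (X : List Bool × List Nat) :
    (if X.2 = [] then tw else tw.insert t ((pre ++ [b]) ++ X.1))
    = (if X.2.map (· + 1) = [] then tw else tw.insert t (pre ++ b :: X.1)) := by
  by_cases h : X.2 = []
  · rw [if_pos h, if_pos (by simp [h])]
  · rw [if_neg h, if_neg (by simpa using h)]
    simp

theorem pvFoldShift (t : Int) (X2 : List Nat) (j : Nat) (k : Int) (doff : List (List Int)) :
    (X2.map (· + j)).foldl (fun d (i : Nat) => pvAppendAt t d (k + (i : Int))) doff
    = X2.foldl (fun d (i : Nat) => pvAppendAt t d ((k + (j : Int)) + (i : Int))) doff := by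
  rw [List.foldl_map]
  have he : (fun (d : List (List Int)) (i : Nat) => pvAppendAt t d (k + ((i + j : Nat) : Int)))
      = fun d (i : Nat) => pvAppendAt t d ((k + (j : Int)) + (i : Int)) := by
    funext d i
    congr 1
    push_cast
    ring
  rw [he]

-- the forcing loop computes pvF (suffix induction; p = max_consec_days - consec)
theorem pvForce_spec (m t : Int) : ∀ (N : Nat) (s : List Bool), s.length ≤ N →
    ∀ (k : Int) (pre : List Bool) (tw : PySem.Dict Int (List Bool))
      (doff : List (List Int)) (c : Int),
    0 ≤ k → pre.length = k.toNat → tw.getD t [] = pre ++ s →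
    ((PySem.List.pyRange k (k + s.length) 1).foldl (pvForceStep (k + s.length) m t) (tw, doff, c))
    = ((if (pvF m s (m - c)).2 = [] then tw else tw.insert t (pre ++ (pvF m s (m - c)).1)),
       (pvF m s (m - c)).2.foldl (fun d (i : Nat) => pvAppendAt t d (k + (i : Int))) doff,
       ((PySem.List.pyRange k (k + s.length) 1).foldl (pvForceStep (k + s.length) m t) (tw, doff, c)).2.2) := by
  intro N
  induction N with
  | zero =>
    intro s hs k pre tw doff c h0 hl hrow
    have hnil : s = [] := List.eq_nil_of_length_eq_zero (by omega)
    subst hnil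
    simp only [List.length_nil, Nat.cast_zero, add_zero]
    rw [PySem.List.pyRange_one_eq_nil (le_refl k), List.foldl_nil]
    simp [pvF_nil]
  | succ N ih =>
    intro s hs k pre tw doff c h0 hl hrow
    match s with
    | [] =>
      simp only [List.length_nil, Nat.cast_zero, add_zero]
      rw [PySem.List.pyRange_one_eq_nil (le_refl k), List.foldl_nil]
      simp [pvF_nil]
    | false :: rest =>
      have hn : k + ((false :: rest).length : Int) = (k + 1) + (rest.length : Int) := by
        simp only [List.length_cons]; push_cast; ring
      rw [hn]
      rw [PySem.List.pyRange_one_cons (by omega), List.foldl_cons]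
      rw [pvForceStep_false _ m t tw doff c k (by rw [hrow]; exact pvGetD_mid pre false rest k false h0 hl)]
      rw [ih rest (by simpa using hs) (k + 1) (pre ++ [false]) tw doff 0 (by omega)
        (by simp; omega) (by rw [hrow]; simp)]
      rw [pvF_false]
      simp only [sub_zero]
      simp only [Prod.mk.injEq]
      refine ⟨?_, ?_, trivial⟩
      · exact pvCombine tw t pre false (pvF m rest m)
      · rw [pvFoldShift t (pvF m rest m).2 1 k doff]
        rfl
    | true :: rest =>
      have hget1 : PySem.List.pyGetD (tw.getD t []) k false = true := by
        rw [hrow]; exact pvGetD_mid pre true rest k false h0 hl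
      by_cases h2 : c + 1 ≥ m
      · -- countdown exhausted: p = m - c ≤ 1
        have hp : m - c ≤ 1 := by omega
        match rest with
        | true :: r' =>
          have hn : k + (((true :: true :: r').length : Nat) : Int)
              = (k + 2) + ((r'.length : Nat) : Int) := by
            simp only [List.length_cons]; push_cast; ring
          rw [hn]
          have hget2 : PySem.List.pyGetD (tw.getD t []) (k + 1) false = true := by
            rw [hrow, show pre ++ true :: true :: r' = (pre ++ [true]) ++ true :: r' by simp]
            exact pvGetD_mid (pre ++ [true]) true r' (k + 1) false (by omega) (by simp; omega)
          rw [PySem.List.pyRange_one_cons (by omega), List.foldl_cons]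
          rw [pvForceStep_force _ m t tw doff c k hget1 h2 (by omega) hget2]
          have hset : PySem.List.pySetD (tw.getD t []) (k + 1) false
              = pre ++ true :: false :: r' := by
            rw [hrow, show pre ++ true :: true :: r' = (pre ++ [true]) ++ true :: r' by simp]
            rw [pvSetD_mid (pre ++ [true]) true false r' (k + 1) (by omega) (by simp; omega)]
            simp
          rw [hset]
          rw [PySem.List.pyRange_one_cons (by omega), List.foldl_cons]
          rw [pvForceStep_false _ m t _ _ 0 (k + 1) (by
            rw [PySem.Dict.getD_insert_self]
            rw [show pre ++ true :: false :: r' = (pre ++ [true]) ++ false :: r' by simp]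
            exact pvGetD_mid (pre ++ [true]) false r' (k + 1) false (by omega) (by simp; omega))]
          have hkk : k + 1 + 1 = k + 2 := by ring
          rw [hkk]
          rw [ih r' (by simp at hs ⊢; omega) (k + 2) (pre ++ [true, false])
            (tw.insert t (pre ++ true :: false :: r')) (pvAppendAt t doff (k + 1)) 0 (by omega)
            (by simp; omega)
            (by rw [PySem.Dict.getD_insert_self]; simp)]
          rw [pvF_force m (m - c) r' hp]
          simp only [sub_zero]
          simp only [Prod.mk.injEq]
          refine ⟨?_, ?_, trivial⟩
          · by_cases hY : (pvF m r' m).2 = []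
            · rw [if_pos hY,
                if_neg (List.cons_ne_nil 1 (List.map (fun x => x + 2) (pvF m r' m).2)),
                pvF_forced_nil m r' m hY]
            · rw [if_neg hY,
                if_neg (List.cons_ne_nil 1 (List.map (fun x => x + 2) (pvF m r' m).2)),
                PySem.Dict.insert_insert_self]
              simp
          · rw [List.foldl_cons, pvFoldShift]
            simp only [Nat.cast_one, Nat.cast_ofNat]
        | [] =>
          have hn : k + (([true].length : Nat) : Int) = k + 1 := by simp
          rw [hn]
          rw [PySem.List.pyRange_one_cons (by omega), List.foldl_cons]
          rw [pvForceStep_noforce _ m t tw doff c k hget1 (by intro hh; exact absurd hh.1 (by omega))]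
          rw [PySem.List.pyRange_one_eq_nil (le_refl (k + 1)), List.foldl_nil]
          rw [pvF_true_one m (m - c) hp]
          simp
        | false :: r'' =>
          have hn : k + (((true :: false :: r'').length : Nat) : Int)
              = (k + 1) + (((false :: r'').length : Nat) : Int) := by
            simp only [List.length_cons]; push_cast; ring
          rw [hn]
          have hget2 : PySem.List.pyGetD (tw.getD t []) (k + 1) false = false := by
            rw [hrow, show pre ++ true :: false :: r'' = (pre ++ [true]) ++ false :: r'' by simp]
            exact pvGetD_mid (pre ++ [true]) false r'' (k + 1) false (by omega) (by simp; omega)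
          rw [PySem.List.pyRange_one_cons (by omega), List.foldl_cons]
          rw [pvForceStep_noforce _ m t tw doff c k hget1 (by
            intro hh; rw [hget2] at hh; exact absurd hh.2 (by simp))]
          rw [ih (false :: r'') (by simpa using hs) (k + 1) (pre ++ [true]) tw doff (c + 1)
            (by omega) (by simp; omega) (by rw [hrow]; simp)]
          rw [pvF_true_false m (m - c) r'' hp]
          have hpc : m - (c + 1) = m - c - 1 := by ring
          rw [hpc]
          simp only [Prod.mk.injEq]
          refine ⟨?_, ?_, trivial⟩
          · exact pvCombine tw t pre true (pvF m (false :: r'') (m - c - 1))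
          · rw [pvFoldShift t (pvF m (false :: r'') (m - c - 1)).2 1 k doff]
            rfl
      · -- countdown still running: p = m - c ≥ 2
        have hp : ¬ (m - c ≤ 1) := by omega
        have hn : k + (((true :: rest).length : Nat) : Int) = (k + 1) + ((rest.length : Nat) : Int) := by
          simp only [List.length_cons]; push_cast; ring
        rw [hn]
        rw [PySem.List.pyRange_one_cons (by omega), List.foldl_cons]
        rw [pvForceStep_small _ m t tw doff c k hget1 h2]
        rw [ih rest (by simpa using hs) (k + 1) (pre ++ [true]) tw doff (c + 1) (by omega)
          (by simp; omega) (by rw [hrow]; simp)]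
        rw [pvF_true_big m (m - c) rest hp]
        have hpc : m - (c + 1) = m - c - 1 := by ring
        rw [hpc]
        simp only [Prod.mk.injEq]
        refine ⟨?_, ?_, trivial⟩
        · exact pvCombine tw t pre true (pvF m rest (m - c - 1))
        · rw [pvFoldShift t (pvF m rest (m - c - 1)).2 1 k doff]
          rfl


theorem pvWRow_len (nt nd dof t : Int) : (pvWRow nt nd dof t).length = nd.toNat := by
  simp [pvWRow, PySem.List.length_pyRange_one]

-- A's pyRange/pyGetD counter scan is pvScan of the row
theorem pvGate (n : Int) (w : List Bool) (hw : w.length = n.toNat) :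
    (PySem.List.pyRange 0 n 1).foldl
      (fun (p : Int × Int) day =>
        if PySem.List.pyGetD w day false then (p.1 + 1, max p.2 (p.1 + 1)) else (0, p.2))
      (0, 0) = pvScan w (0, 0) := by
  by_cases hn : 0 ≤ n
  · have hn' : n = (w.length : Int) := by omega
    rw [hn',
      PySem.List.foldl_pyRange_zero_pyGetD' w false
        (fun (p : Int × Int) b => if b then (p.1 + 1, max p.2 (p.1 + 1)) else (0, p.2)) (0, 0)]
    rfl
  · have hw0 : w = [] := List.eq_nil_of_length_eq_zero (by omega)
    subst hw0
    rw [PySem.List.pyRange_one_eq_nil (by omega), List.foldl_nil, pvScan_nil]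

theorem pvMapReplace (done rest : List (Int × List Bool)) (t : Int) (w v : List Bool)
    (h : ((done ++ (t, w) :: rest).map Prod.fst).Nodup) :
    (done ++ (t, w) :: rest).map (fun p => if p.1 == t then (t, v) else p)
    = done ++ (t, v) :: rest := by
  simp only [List.map_append, List.map_cons] at h
  have hdj := List.disjoint_of_nodup_append h
  have hd : ∀ p ∈ done, p.1 ≠ t := by
    intro p hp he
    exact hdj (List.mem_map_of_mem hp) (by simp [he])
  have hr : ∀ p ∈ rest, p.1 ≠ t := by
    have h2 := (h.of_append_right : ((t, w).1 :: rest.map Prod.fst).Nodup)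
    rw [List.nodup_cons] at h2
    intro p hp he
    exact h2.1 (by rw [← he]; exact List.mem_map_of_mem hp)
  rw [List.map_append, List.map_cons]
  congr 1
  · rw [List.map_congr_left (g := id) (fun p hp => by
      simp only [id_eq]
      rw [if_neg (by simpa using hd p hp)]), List.map_id]
  · congr 1
    · simp
    · rw [List.map_congr_left (g := id) (fun p hp => by
        simp only [id_eq]
        rw [if_neg (by simpa using hr p hp)]), List.map_id]

theorem pvAStep_spec (n m t : Int) (done rest : List (Int × List Bool)) (w : List Bool)
    (doff : List (List Int))
    (hnd : ((done ++ (t, w) :: rest).map Prod.fst).Nodup)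
    (hw : w.length = n.toNat) :
    pvAStep n m (PySem.Dict.mk (done ++ (t, w) :: rest), doff) t
    = (PySem.Dict.mk (done ++ (t, (pvTeamRes m t w doff).1) :: rest),
       (pvTeamRes m t w doff).2) := by
  have hkeys : (PySem.Dict.mk (done ++ (t, w) :: rest) : PySem.Dict Int (List Bool)).keys.Nodup := hnd
  have hget : (PySem.Dict.mk (done ++ (t, w) :: rest) : PySem.Dict Int (List Bool)).getD t [] = w := by
    apply PySem.Dict.getD_of_mem_items
    · simp
    · exact hkeys
  simp only [pvAStep, hget, pvGate n w hw]
  by_cases hg : (pvScan w (0, 0)).2 > m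
  · rw [if_pos hg]
    unfold pvForce
    by_cases hn : 0 ≤ n
    · have hn' : n = (0 : Int) + (w.length : Int) := by omega
      rw [hn']
      rw [pvForce_spec m t w.length w (le_refl _) 0 [] _ doff 0 (le_refl 0) (by simp) (by simpa using hget)]
      simp only [sub_zero, List.nil_append]
      rw [pvTeamRes, if_pos hg]
      by_cases hF : (pvF m w m).2 = []
      · rw [if_pos hF, pvF_forced_nil m w m hF]
        simp only [Prod.mk.injEq]
        constructor
        · trivial
        · simp [zero_add]
      · rw [if_neg hF]
        simp only [Prod.mk.injEq]
        constructor
        · apply PySem.Dict.ext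
          rw [PySem.Dict.items_insert_of_contains _ _ (by
            rw [PySem.Dict.contains_iff_mem_keys]
            simp [PySem.Dict.keys])]
          exact pvMapReplace done rest t w (pvF m w m).1 hnd
        · simp [zero_add]
    · -- n < 0 : empty loop, empty row
      have hw0 : w = [] := List.eq_nil_of_length_eq_zero (by omega)
      subst hw0
      rw [PySem.List.pyRange_one_eq_nil (by omega), List.foldl_nil]
      rw [pvTeamRes, if_pos hg]
      simp [pvF_nil]
  · rw [if_neg hg, pvTeamRes, if_neg hg]

theorem pvAFold (nt nd dof m : Int) : ∀ (ts : List Int) (done : List (Int × List Bool))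
    (doff : List (List Int)),
    (done.map Prod.fst ++ ts).Nodup →
    ts.foldl (pvAStep nd m)
      (PySem.Dict.mk (done ++ ts.map (fun t => (t, pvWRow nt nd dof t))), doff)
    = (PySem.Dict.mk (done ++ (pvFinal nt nd dof m ts doff).1),
       (pvFinal nt nd dof m ts doff).2) := by
  intro ts
  induction ts with
  | nil => intro done doff _; simp [pvFinal]
  | cons t ts ih =>
    intro done doff hnd
    rw [List.map_cons, List.foldl_cons]
    have hnd' : ((done ++ (t, pvWRow nt nd dof t) :: ts.map (fun t => (t, pvWRow nt nd dof t))).map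
        Prod.fst).Nodup := by
      simpa [List.map_append, Function.comp_def] using hnd
    rw [pvAStep_spec nd m t done _ _ doff hnd' (pvWRow_len nt nd dof t)]
    have hassoc : done ++ (t, (pvTeamRes m t (pvWRow nt nd dof t) doff).1)
        :: ts.map (fun t => (t, pvWRow nt nd dof t))
        = (done ++ [(t, (pvTeamRes m t (pvWRow nt nd dof t) doff).1)])
          ++ ts.map (fun t => (t, pvWRow nt nd dof t)) := by simp
    rw [hassoc]
    rw [ih (done ++ [(t, (pvTeamRes m t (pvWRow nt nd dof t) doff).1)])
      ((pvTeamRes m t (pvWRow nt nd dof t) doff).2) (by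
        simpa [List.map_append] using hnd)]
    simp [pvFinal]


-- equations for pvRuns
theorem pvRuns_nil (k : Int) : pvRuns [] k = [] := by rw [pvRuns]
theorem pvRuns_false (r : List Bool) (k : Int) : pvRuns (false :: r) k = pvRuns r (k + 1) := by
  rw [pvRuns]
theorem pvRuns_true (r : List Bool) (k : Int) :
    pvRuns (true :: r) k
    = (k, 1 + (pvLead r : Int)) :: pvRuns (r.drop (pvLead r)) (k + 1 + (pvLead r : Int)) := by
  rw [pvRuns]

theorem pvLens_nil' : pvLens [] = [] := by rw [pvLens]
theorem pvLens_false' (r : List Bool) : pvLens (false :: r) = pvLens r := by rw [pvLens]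
theorem pvLens_true' (r : List Bool) :
    pvLens (true :: r) = (1 + (pvLead r : Int)) :: pvLens (r.drop (pvLead r)) := by rw [pvLens]

theorem pvRuns_map_snd : ∀ (N : Nat) (w : List Bool), w.length ≤ N → ∀ (k : Int),
    (pvRuns w k).map Prod.snd = pvLens w := by
  intro N
  induction N with
  | zero =>
    intro w hw k
    have : w = [] := List.eq_nil_of_length_eq_zero (by omega)
    subst this
    rw [pvRuns_nil, pvLens_nil']
    rfl
  | succ N ih =>
    intro w hw k
    match w with
    | [] => rw [pvRuns_nil, pvLens_nil']; rfl
    | false :: r => rw [pvRuns_false, pvLens_false', ih r (by simpa using hw) (k + 1)]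
    | true :: r =>
      rw [pvRuns_true, pvLens_true', List.map_cons]
      rw [ih (r.drop (pvLead r)) (by simp at hw ⊢; omega) (k + 1 + (pvLead r : Int))]

theorem pvLead_decomp : ∀ (w : List Bool),
    w = List.replicate (pvLead w) true ++ w.drop (pvLead w) := by
  intro w
  induction w with
  | nil => rfl
  | cons b r ih =>
    cases b
    · rw [pvLead_false]; rfl
    · rw [pvLead_true]
      simp only [List.replicate_succ, List.cons_append, List.drop_succ_cons]
      exact congrArg (true :: ·) ih

-- flush helper naming the tail of pvRunsOf
def pvFlush (n : Int) (st : List (Int × Int) × Option Int) : List (Int × Int) :=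
  match st.2 with
  | some s => st.1 ++ [(s, n - s)]
  | none => st.1

theorem pvRunsOf_flush (w : List Bool) (n : Int) :
    pvRunsOf w n = pvFlush n ((PySem.List.enumerate w 0).foldl pvScanStep ([], none)) := rfl

theorem pvScanStep_true_none (acc : List (Int × Int)) (d : Int) :
    pvScanStep (acc, none) (d, true) = (acc, some d) := rfl
theorem pvScanStep_true_some (acc : List (Int × Int)) (s d : Int) :
    pvScanStep (acc, some s) (d, true) = (acc, some s) := rfl
theorem pvScanStep_false_none (acc : List (Int × Int)) (d : Int) :
    pvScanStep (acc, none) (d, false) = (acc, none) := rfl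
theorem pvScanStep_false_some (acc : List (Int × Int)) (s d : Int) :
    pvScanStep (acc, some s) (d, false) = (acc ++ [(s, d - s)], none) := rfl

theorem pvScan_inv : ∀ (w : List Bool) (k : Int) (n : Int), n = k + w.length →
    (∀ (acc : List (Int × Int)),
      pvFlush n ((PySem.List.enumerate w k).foldl pvScanStep (acc, none)) = acc ++ pvRuns w k)
    ∧ (∀ (acc : List (Int × Int)) (st : Int),
      pvFlush n ((PySem.List.enumerate w k).foldl pvScanStep (acc, some st))
      = acc ++ (st, (k - st) + (pvLead w : Int))
          :: pvRuns (w.drop (pvLead w)) (k + (pvLead w : Int))) := by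
  intro w
  induction w with
  | nil =>
    intro k n hn
    constructor
    · intro acc
      rw [PySem.List.enumerate_nil, List.foldl_nil, pvRuns_nil, pvFlush]
      simp
    · intro acc st
      rw [PySem.List.enumerate_nil, List.foldl_nil, pvFlush]
      have hnk : n = k := by simpa using hn
      rw [hnk]
      simp [pvRuns_nil, pvLead_nil]
  | cons b r ih =>
    intro k n hn
    have hn' : n = (k + 1) + r.length := by simp at hn; push_cast at hn ⊢; omega
    cases b
    · constructor
      · intro acc
        rw [PySem.List.enumerate_cons, List.foldl_cons, pvScanStep_false_none,
          (ih (k + 1) n hn').1, pvRuns_false]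
      · intro acc st
        rw [PySem.List.enumerate_cons, List.foldl_cons, pvScanStep_false_some,
          (ih (k + 1) n hn').1]
        simp only [pvLead_false, List.drop_zero, Nat.cast_zero, add_zero]
        rw [pvRuns_false]
        simp
    · constructor
      · intro acc
        rw [PySem.List.enumerate_cons, List.foldl_cons, pvScanStep_true_none,
          (ih (k + 1) n hn').2, pvRuns_true]
        have h1 : k + 1 - k = (1 : Int) := by ring
        rw [h1]
      · intro acc st
        rw [PySem.List.enumerate_cons, List.foldl_cons, pvScanStep_true_some,
          (ih (k + 1) n hn').2]
        simp only [pvLead_true, List.drop_succ_cons]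
        push_cast
        try ring_nf

theorem pvRunsOf_eq (w : List Bool) (n : Int) (h : n = (w.length : Int)) :
    pvRunsOf w n = pvRuns w 0 := by
  rw [pvRunsOf_flush, (pvScan_inv w 0 n (by omega)).1 []]
  rfl


theorem pvProg_lt (t m s L : Int) (wd : List Bool × List (List Int)) (p : Int) (h : p < L) :
    pvProg t m s L wd p
    = pvProg t m s L
        (PySem.List.pySetD wd.1 (s + p) false, pvAppendAt t wd.2 (s + p))
        (p + max m 1 + 1) := by
  rw [pvProg, if_pos h]
  rfl

theorem pvProg_ge (t m s L : Int) (wd : List Bool × List (List Int)) (p : Int) (h : ¬ p < L) :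
    pvProg t m s L wd p = wd := by
  rw [pvProg, if_neg h]

theorem pvProg_shift (t m : Int) : ∀ (fuel : Nat) (L p : Int), (L - p).toNat ≤ fuel →
    ∀ (a s : Int) (wd : List Bool × List (List Int)),
    pvProg t m s L wd p = pvProg t m (s + a) (L - a) wd (p - a) := by
  intro fuel
  induction fuel with
  | zero =>
    intro L p h a s wd
    rw [pvProg_ge t m s L wd p (by omega), pvProg_ge t m (s + a) (L - a) wd (p - a) (by omega)]
  | succ fuel ih =>
    intro L p h a s wd
    by_cases hp : p < L
    · rw [pvProg_lt t m s L wd p hp, pvProg_lt t m (s + a) (L - a) wd (p - a) (by omega)]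
      have h1 : s + a + (p - a) = s + p := by ring
      rw [h1]
      have h2 : p - a + max m 1 + 1 = (p + max m 1 + 1) - a := by ring
      rw [h2]
      exact ih L (p + max m 1 + 1) (by have := le_max_right m 1; omega) a s _
    · rw [pvProg_ge t m s L wd p hp, pvProg_ge t m (s + a) (L - a) wd (p - a) (by omega)]

theorem pvRepSplit {α : Type} (n j : Nat) (a : α) (h : j < n) :
    List.replicate n a = List.replicate j a ++ a :: List.replicate (n - j - 1) a := by
  have h1 : n = j + (1 + (n - j - 1)) := by omega
  rw [h1, List.replicate_add, List.replicate_add]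
  simp [List.replicate_succ]

theorem pvProg_run (t m : Int) : ∀ (fuel : Nat) (L p : Int), (L - p).toNat ≤ fuel → 1 ≤ p →
    ∀ (s : Int) (pre rest : List Bool) (doff : List (List Int)),
    0 ≤ s → pre.length = s.toNat →
    pvProg t m s L (pre ++ List.replicate L.toNat true ++ rest, doff) p
    = (pre ++ (pvApply m L.toNat p).1 ++ rest,
       (pvApply m L.toNat p).2.foldl (fun d (i : Nat) => pvAppendAt t d (s + (i : Int))) doff) := by
  intro fuel
  induction fuel with
  | zero =>
    intro L p hf hp s pre rest doff hs hl
    rw [pvProg_ge t m s L _ p (by omega), pvApply_neg m L.toNat p (by omega)]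
    simp
  | succ fuel ih =>
    intro L p hf hp s pre rest doff hs hl
    by_cases hpL : p < L
    · have hL2 : 2 ≤ L := by omega
      rw [pvProg_lt t m s L _ p hpL]
      have hsplit : List.replicate L.toNat true
          = List.replicate p.toNat true ++ true :: List.replicate (L.toNat - p.toNat - 1) true :=
        pvRepSplit L.toNat p.toNat true (by omega)
      have hset : PySem.List.pySetD (pre ++ List.replicate L.toNat true ++ rest) (s + p) false
          = (pre ++ List.replicate p.toNat true)
            ++ false :: (List.replicate (L.toNat - p.toNat - 1) true ++ rest) := by
        rw [hsplit]
        rw [show pre ++ (List.replicate p.toNat true ++ true :: List.replicate (L.toNat - p.toNat - 1) true) ++ rest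
            = (pre ++ List.replicate p.toNat true) ++ true :: (List.replicate (L.toNat - p.toNat - 1) true ++ rest) by simp]
        exact pvSetD_mid _ true false _ (s + p) (by omega) (by simp [hl]; omega)
      rw [hset]
      rw [pvProg_shift t m ((L - (p + max m 1 + 1)).toNat) L (p + max m 1 + 1)
        (le_refl _) (p + 1) s _]
      have ha : p + max m 1 + 1 - (p + 1) = max m 1 := by ring
      rw [ha]
      have hlist : (pre ++ List.replicate p.toNat true) ++ false :: (List.replicate (L.toNat - p.toNat - 1) true ++ rest)
          = ((pre ++ List.replicate p.toNat true) ++ [false]) ++ List.replicate (L - p - 1).toNat true ++ rest := by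
        have : (L - p - 1).toNat = L.toNat - p.toNat - 1 := by omega
        rw [this]
        simp
      rw [hlist]
      rw [show (pre ++ List.replicate L.toNat true ++ rest, doff).2 = doff from rfl]
      have hL1 : L - (p + 1) = L - p - 1 := by ring
      rw [hL1]
      rw [ih (L - p - 1) (max m 1) (by have := le_max_right m 1; omega)
        (le_max_right m 1) (s + (p + 1)) ((pre ++ List.replicate p.toNat true) ++ [false]) rest
        (pvAppendAt t doff (s + p)) (by omega) (by simp [hl]; omega)]
      rw [pvApply_pos m L.toNat p ⟨by omega, by omega⟩]
      simp only [Prod.mk.injEq]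
      constructor
      · have h2 : (L - p - 1).toNat = L.toNat - p.toNat - 1 := by omega
        rw [h2]
        simp
      · rw [List.foldl_cons]
        have hip : s + ((p.toNat : Nat) : Int) = s + p := by omega
        rw [hip, List.foldl_map]
        have hfe : (fun (d : List (List Int)) (i : Nat) => pvAppendAt t d (s + ((i + (p.toNat + 1) : Nat) : Int)))
            = fun d (i : Nat) => pvAppendAt t d ((s + (p + 1)) + (i : Int)) := by
          funext d i
          congr 1
          push_cast
          omega
        rw [hfe]
        have h2' : (L - p - 1).toNat = L.toNat - p.toNat - 1 := by omega
        rw [h2']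
    · rw [pvProg_ge t m s L _ p hpL, pvApply_neg m L.toNat p (by omega)]
      simp

-- folding Source B's while loop over the run list computes pvF
theorem pvRunsFold (t m : Int) : ∀ (N : Nat) (sfx : List Bool), sfx.length ≤ N →
    ∀ (k : Int) (pre : List Bool) (doff : List (List Int)), 0 ≤ k → pre.length = k.toNat →
    (pvRuns sfx k).foldl (fun wd r => pvProg t m r.1 r.2 wd (max m 1)) (pre ++ sfx, doff)
    = (pre ++ (pvF m sfx m).1,
       (pvF m sfx m).2.foldl (fun d (i : Nat) => pvAppendAt t d (k + (i : Int))) doff) := by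
  intro N
  induction N with
  | zero =>
    intro sfx hfx k pre doff h0 hl
    have : sfx = [] := List.eq_nil_of_length_eq_zero (by omega)
    subst this
    rw [pvRuns_nil, List.foldl_nil, pvF_nil]
    simp
  | succ N ih =>
    intro sfx hfx k pre doff h0 hl
    match sfx with
    | [] =>
      rw [pvRuns_nil, List.foldl_nil, pvF_nil]
      simp
    | false :: r =>
      rw [pvRuns_false, pvF_false]
      rw [show pre ++ false :: r = (pre ++ [false]) ++ r by simp]
      rw [ih r (by simpa using hfx) (k + 1) (pre ++ [false]) doff (by omega) (by simp; omega)]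
      simp only [Prod.mk.injEq]
      constructor
      · simp
      · rw [pvFoldShift t (pvF m r m).2 1 k doff]
        simp only [Nat.cast_one]
    | true :: r =>
      rw [pvRuns_true, List.foldl_cons]
      have hdecomp : true :: r
          = List.replicate (1 + pvLead r) true ++ r.drop (pvLead r) := by
        have h := pvLead_decomp (true :: r)
        rw [pvLead_true, List.drop_succ_cons] at h
        rw [show pvLead r + 1 = 1 + pvLead r by omega] at h
        exact h
      have hLnat : (1 + (pvLead r : Int)).toNat = 1 + pvLead r := by omega
      have hrestd : r.drop (pvLead r) = [] ∨ ∃ s', r.drop (pvLead r) = false :: s' :=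
        pvDrop_lead r
      have hx : pre ++ true :: r
          = pre ++ List.replicate ((1 + (pvLead r : Int)).toNat) true ++ r.drop (pvLead r) := by
        conv_lhs => rw [hdecomp]
        rw [hLnat]
        simp
      rw [hx]
      rw [pvProg_run t m ((1 + (pvLead r : Int)) - max m 1).toNat (1 + (pvLead r : Int))
        (max m 1) (le_refl _) (le_max_right m 1) k pre (r.drop (pvLead r)) doff h0 hl]
      rw [ih (r.drop (pvLead r)) (by simp at hfx ⊢; omega) (k + 1 + (pvLead r : Int))
        (pre ++ (pvApply m ((1 + (pvLead r : Int)).toNat) (max m 1)).1)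
        ((pvApply m ((1 + (pvLead r : Int)).toNat) (max m 1)).2.foldl
          (fun d (i : Nat) => pvAppendAt t d (k + (i : Int))) doff)
        (by omega)
        (by rw [List.length_append, pvApply_len]; omega)]
      conv_rhs => rw [hdecomp]
      rw [show List.replicate (1 + pvLead r) true = List.replicate ((1 + (pvLead r : Int)).toNat) true by rw [hLnat]]
      rw [pvF_run m ((1 + (pvLead r : Int)).toNat) (r.drop (pvLead r)) m hrestd]
      have hmm : max m 1 = m ⊔ 1 := rfl
      simp only [Prod.mk.injEq]
      constructor
      · simp
      · rw [List.foldl_append, List.foldl_map]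
        have hfe : (fun (d : List (List Int)) (i : Nat) =>
              pvAppendAt t d (k + ((i + (1 + (pvLead r : Int)).toNat : Nat) : Int)))
            = fun d (i : Nat) => pvAppendAt t d ((k + 1 + (pvLead r : Int)) + (i : Int)) := by
          funext d i
          congr 1
          push_cast
          omega
        rw [hfe]

theorem pvTeamRes_all_false (m t : Int) (w : List Bool) (doff : List (List Int))
    (h : ∀ x ∈ w, x = false) : pvTeamRes m t w doff = (w, doff) := by
  rw [pvTeamRes]
  split_ifs with hg
  · rw [pvF_all_false m w m h]
    simp
  · rfl

theorem pvBTeam_spec (nt nd dof m : Int) (done : List (Int × List Bool))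
    (doff : List (List Int)) (t : Int)
    (hfresh : t ∉ done.map Prod.fst) :
    pvBTeam nt nd dof m (PySem.Dict.mk done, doff) t
    = (PySem.Dict.mk (done ++ [(t, (pvTeamRes m t (pvWRow nt nd dof t) doff).1)]),
       (pvTeamRes m t (pvWRow nt nd dof t) doff).2) := by
  have hcont : (PySem.Dict.mk done : PySem.Dict Int (List Bool)).contains t = false := by
    rw [PySem.Dict.contains_eq_decide_mem_keys]
    exact decide_eq_false (by simpa [PySem.Dict.keys] using hfresh)
  have hins : ∀ v : List Bool,
      (PySem.Dict.mk done : PySem.Dict Int (List Bool)).insert t v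
      = PySem.Dict.mk (done ++ [(t, v)]) := by
    intro v
    apply PySem.Dict.ext
    rw [PySem.Dict.items_insert_of_not_contains _ _ hcont]
  by_cases hn : 0 ≤ nd
  · have hlen : nd = ((pvWRow nt nd dof t).length : Int) := by
      rw [pvWRow_len]; omega
    simp only [pvBTeam]
    rw [pvRunsOf_eq _ _ hlen]
    rw [pvRuns_map_snd ((pvWRow nt nd dof t).length) _ (le_refl _) 0]
    cases hL : pvLens (pvWRow nt nd dof t) with
    | nil =>
      have hall := pvLens_nil_all_false _ hL
      rw [show PySem.List.max? ([] : List Int) (fun x => x) = none from rfl]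
      simp only []
      rw [hins, pvTeamRes_all_false m t _ doff hall]
    | cons L0 lens' =>
      rw [PySem.List.max?_id_cons]
      have hL0 : 1 ≤ L0 := pvLens_pos _ L0 (by rw [hL]; simp)
      have hmx : lens'.foldl max L0 = (pvScan (pvWRow nt nd dof t) (0, 0)).2 := by
        have h1 := pvLens_fold_aux (pvWRow nt nd dof t).length (pvWRow nt nd dof t)
          (le_refl _) 0 (le_refl 0)
        rw [hL, List.foldl_cons] at h1
        have h2 : max (0 : Int) L0 = L0 := by omega
        rw [h2] at h1
        rw [h1]
        have h3 := pvScan_snd_nonneg (pvWRow nt nd dof t) 0 0 (le_refl 0)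
        omega
      rw [hmx]
      simp only []
      by_cases hg : (pvScan (pvWRow nt nd dof t) (0, 0)).2 > m
      · rw [if_pos hg]
        have hRF := pvRunsFold t m (pvWRow nt nd dof t).length (pvWRow nt nd dof t) (le_refl _) 0 []
          doff (le_refl 0) (by simp)
        simp only [List.nil_append, zero_add] at hRF
        rw [hRF]
        rw [hins, pvTeamRes, if_pos hg]
      · rw [if_neg hg, hins, pvTeamRes, if_neg hg]
  · -- nd < 0 : the row is empty
    have hw0 : pvWRow nt nd dof t = [] :=
      List.eq_nil_of_length_eq_zero (by rw [pvWRow_len]; omega)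
    simp only [pvBTeam, hw0]
    rw [show pvRunsOf [] nd = [] from rfl]
    simp only [List.map_nil]
    rw [show PySem.List.max? ([] : List Int) (fun x => x) = none from rfl]
    simp only []
    rw [hins, pvTeamRes_all_false m t [] doff (by simp)]

theorem pvBFold (nt nd dof m : Int) : ∀ (ts : List Int) (done : List (Int × List Bool))
    (doff : List (List Int)),
    (done.map Prod.fst ++ ts).Nodup →
    ts.foldl (pvBTeam nt nd dof m) (PySem.Dict.mk done, doff)
    = (PySem.Dict.mk (done ++ (pvFinal nt nd dof m ts doff).1),
       (pvFinal nt nd dof m ts doff).2) := by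
  intro ts
  induction ts with
  | nil => intro done doff _; simp [pvFinal]
  | cons t ts ih =>
    intro done doff hnd
    rw [List.foldl_cons]
    have hfresh : t ∉ done.map Prod.fst := by
      intro hmem
      exact List.disjoint_of_nodup_append hnd hmem (by simp)
    rw [pvBTeam_spec nt nd dof m done doff t hfresh]
    rw [ih (done ++ [(t, (pvTeamRes m t (pvWRow nt nd dof t) doff).1)])
      ((pvTeamRes m t (pvWRow nt nd dof t) doff).2) (by simpa [List.map_append] using hnd)]
    simp [pvFinal]


-- ===== phase 1 (the day loop) in closed form =====
def pvTW (n_teams n_days days_off_per_turn k : Int) : PySem.Dict Int (List Bool) :=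
  PySem.Dict.mk ((PySem.List.pyRange 0 n_teams 1).map fun t =>
    (t, (PySem.List.pyRange 0 n_days 1).map fun d =>
      if d < k then decide (pvOffTeam n_teams days_off_per_turn d ≠ t) else true))

def pvDOFF (n_teams n_days days_off_per_turn k : Int) : List (List Int) :=
  (PySem.List.pyRange 0 n_days 1).map fun d =>
    if d < k then [pvOffTeam n_teams days_off_per_turn d] else []

theorem pvTW_items (n_teams n_days days_off_per_turn k : Int) :
    (pvTW n_teams n_days days_off_per_turn k).items =
    (PySem.List.pyRange 0 n_teams 1).map (fun t =>
      (t, (PySem.List.pyRange 0 n_days 1).map fun d =>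
        if d < k then decide (pvOffTeam n_teams days_off_per_turn d ≠ t) else true)) := rfl

theorem pvTW_keys (n_teams n_days days_off_per_turn k : Int) :
    (pvTW n_teams n_days days_off_per_turn k).keys = PySem.List.pyRange 0 n_teams 1 := by
  simp [pvTW, PySem.Dict.keys_mk, List.map_map, Function.comp_def]

theorem pvTW_keys_nodup (n_teams n_days days_off_per_turn k : Int) :
    (pvTW n_teams n_days days_off_per_turn k).keys.Nodup := by
  rw [pvTW_keys]; exact PySem.List.nodup_pyRange_one 0 n_teams

theorem pvTW_getD (n_teams n_days days_off_per_turn k t : Int) (h0 : 0 ≤ t) (h1 : t < n_teams) :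
    (pvTW n_teams n_days days_off_per_turn k).getD t [] =
    (PySem.List.pyRange 0 n_days 1).map (fun d =>
      if d < k then decide (pvOffTeam n_teams days_off_per_turn d ≠ t) else true) := by
  apply PySem.Dict.getD_of_mem_items
  · rw [pvTW_items]
    exact List.mem_map_of_mem (PySem.List.mem_pyRange_one.mpr ⟨h0, h1⟩)
  · exact pvTW_keys_nodup _ _ _ _

theorem pvTW_contains (n_teams n_days days_off_per_turn k t : Int) (h0 : 0 ≤ t) (h1 : t < n_teams) :
    (pvTW n_teams n_days days_off_per_turn k).contains t = true := by
  rw [PySem.Dict.contains_iff_mem_keys, pvTW_keys]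
  exact PySem.List.mem_pyRange_one.mpr ⟨h0, h1⟩

theorem pvMapRange_const {α : Type} (n : Int) (f : Int → α) (c : α)
    (h : ∀ d, 0 ≤ d → d < n → f d = c) :
    (PySem.List.pyRange 0 n 1).map f = List.replicate n.toNat c := by
  rw [List.map_congr_left (g := fun _ => c) (fun d hd => by
    rcases PySem.List.mem_pyRange_one.mp hd with ⟨hd0, hd1⟩
    exact h d hd0 hd1)]
  rw [List.map_const', PySem.List.length_pyRange_one]
  norm_num

theorem pvPhase1_zero (n_teams n_days days_off_per_turn : Int) :
    (((PySem.List.pyRange 0 n_teams 1).foldl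
        (fun d t => d.insert t (List.replicate n_days.toNat true)) PySem.Dict.empty,
      (List.replicate n_days.toNat [] : List (List Int))) :
        PySem.Dict Int (List Bool) × List (List Int)) =
    (pvTW n_teams n_days days_off_per_turn 0, pvDOFF n_teams n_days days_off_per_turn 0) := by
  rw [Prod.mk.injEq]
  constructor
  · apply PySem.Dict.ext
    rw [PySem.Dict.items_foldl_insert_fresh _ (fun a => a) _ _
      (fun a _ => by simp) (by simpa using PySem.List.nodup_pyRange_one 0 n_teams)]
    rw [pvTW_items]
    simp only [PySem.Dict.empty]
    apply List.map_congr_left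
    intro t _
    rw [Prod.mk.injEq]
    refine ⟨rfl, ?_⟩
    rw [pvMapRange_const _ _ true (fun d hd0 _ => by rw [if_neg (by omega)])]
  · rw [pvDOFF, pvMapRange_const _ _ [] (fun d hd0 _ => by rw [if_neg (by omega)])]

theorem pvADayStep_eq (n_teams days_off_per_turn : Int)
    (st : PySem.Dict Int (List Bool) × List (List Int)) (day : Int) :
    pvADayStep n_teams days_off_per_turn st day =
    (st.1.insert (pvOffTeam n_teams days_off_per_turn day)
       (PySem.List.pySetD (st.1.getD (pvOffTeam n_teams days_off_per_turn day) []) day false),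
     PySem.List.pySetD st.2 day
       (PySem.List.pyGetD st.2 day [] ++ [pvOffTeam n_teams days_off_per_turn day])) := rfl

theorem pvDayStep_closed (n_teams n_days days_off_per_turn : Int)
    (hnt : 0 < n_teams) (k : Int) (hk0 : 0 ≤ k) (hk : k < n_days) :
    pvADayStep n_teams days_off_per_turn
      (pvTW n_teams n_days days_off_per_turn k, pvDOFF n_teams n_days days_off_per_turn k) k =
    (pvTW n_teams n_days days_off_per_turn (k + 1),
     pvDOFF n_teams n_days days_off_per_turn (k + 1)) := by
  rw [pvADayStep_eq]
  have ho0 : 0 ≤ pvOffTeam n_teams days_off_per_turn k := PySem.Int.mod_nonneg _ hnt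
  have ho1 : pvOffTeam n_teams days_off_per_turn k < n_teams := PySem.Int.mod_lt _ hnt
  have hdayslen : (PySem.List.pyRange 0 n_days 1).length = n_days.toNat := by
    rw [PySem.List.length_pyRange_one]; norm_num
  rw [Prod.mk.injEq]
  constructor
  · apply PySem.Dict.ext
    rw [PySem.Dict.items_insert_of_contains _ _ (pvTW_contains _ _ _ _ _ ho0 ho1)]
    rw [pvTW_items, pvTW_items, List.map_map]
    apply List.map_congr_left
    intro t ht
    rcases PySem.List.mem_pyRange_one.mp ht with ⟨ht0, ht1⟩
    simp only [Function.comp_apply]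
    by_cases hto : t = pvOffTeam n_teams days_off_per_turn k
    · subst hto
      rw [if_pos (by simp)]
      rw [Prod.mk.injEq]
      refine ⟨rfl, ?_⟩
      rw [pvTW_getD _ _ _ _ _ ht0 ht1, PySem.List.pySetD_of_nonneg _ _ hk0]
      apply List.ext_getElem
      · simp [hdayslen]
      · intro j hj1 hj2
        have hjlen : j < (PySem.List.pyRange 0 n_days 1).length := by
          simp only [List.length_set, List.length_map] at hj1
          exact hj1
        rw [List.getElem_set]
        by_cases hjk : k.toNat = j
        · rw [if_pos hjk, List.getElem_map, PySem.List.getElem_pyRange_one _ _ _ hjlen,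
            zero_add]
          have hkj : (j : Int) = k := by omega
          rw [hkj, if_pos (by omega)]
          simp
        · rw [if_neg hjk, List.getElem_map, List.getElem_map,
            PySem.List.getElem_pyRange_one _ _ _ hjlen, zero_add]
          have hne : (j : Int) ≠ k := by omega
          split_ifs with hA hB hB
          · rfl
          · omega
          · omega
          · rfl
    · rw [if_neg (by simp [hto])]
      rw [Prod.mk.injEq]
      refine ⟨rfl, ?_⟩
      apply List.map_congr_left
      intro d hd
      rcases PySem.List.mem_pyRange_one.mp hd with ⟨hd0, hd1⟩
      by_cases hdk : d = k
      · subst hdk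
        rw [if_neg (by omega), if_pos (by omega)]
        have hne : pvOffTeam n_teams days_off_per_turn d ≠ t := fun he => hto he.symm
        simp [hne]
      · split_ifs with hA hB hB
        · rfl
        · omega
        · omega
        · rfl
  · rw [pvDOFF, pvDOFF]
    rw [PySem.List.pyGetD_map_pyRange_of_nonneg _ _ _ _ hk0 hk]
    rw [if_neg (by omega), List.nil_append]
    rw [PySem.List.pySetD_of_nonneg _ _ hk0]
    apply List.ext_getElem
    · simp [hdayslen]
    · intro j hj1 hj2
      have hjlen : j < (PySem.List.pyRange 0 n_days 1).length := by
        simp only [List.length_set, List.length_map] at hj1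
        exact hj1
      rw [List.getElem_set]
      by_cases hjk : k.toNat = j
      · rw [if_pos hjk, List.getElem_map, PySem.List.getElem_pyRange_one _ _ _ hjlen,
          zero_add]
        have hkj : (j : Int) = k := by omega
        rw [hkj, if_pos (by omega)]
      · rw [if_neg hjk, List.getElem_map, List.getElem_map,
          PySem.List.getElem_pyRange_one _ _ _ hjlen, zero_add]
        have hne : (j : Int) ≠ k := by omega
        split_ifs with hA hB hB
        · rfl
        · omega
        · omega
        · rfl

theorem pvPhase1 (n_teams n_days days_off_per_turn : Int)
    (hnt : 0 < n_teams) :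
    ∀ (k : Nat), (k : Int) ≤ n_days →
    (PySem.List.pyRange 0 k 1).foldl (pvADayStep n_teams days_off_per_turn)
      ((PySem.List.pyRange 0 n_teams 1).foldl
        (fun d t => d.insert t (List.replicate n_days.toNat true)) PySem.Dict.empty,
       List.replicate n_days.toNat []) =
    (pvTW n_teams n_days days_off_per_turn k, pvDOFF n_teams n_days days_off_per_turn k) := by
  intro k
  induction k with
  | zero =>
    intro _
    rw [Nat.cast_zero, PySem.List.pyRange_one_eq_nil (le_refl 0), List.foldl_nil]
    exact pvPhase1_zero n_teams n_days days_off_per_turn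
  | succ k ih =>
    intro h
    have hcast : ((k + 1 : Nat) : Int) = (k : Int) + 1 := by push_cast; ring
    rw [hcast, PySem.List.pyRange_one_succ_right (by positivity), List.foldl_append,
      ih (by omega), List.foldl_cons, List.foldl_nil]
    exact pvDayStep_closed n_teams n_days days_off_per_turn hnt k (by positivity)
      (by omega)

theorem pvA_ph1 (n_teams n_days days_off_per_turn : Int)
    (hpre : n_days ≤ 0 ∨ (1 ≤ n_teams ∧ days_off_per_turn ≠ 0)) :
    (PySem.List.pyRange 0 n_days 1).foldl (pvADayStep n_teams days_off_per_turn)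
      ((PySem.List.pyRange 0 n_teams 1).foldl
        (fun d t => d.insert t (List.replicate n_days.toNat true)) PySem.Dict.empty,
       List.replicate n_days.toNat []) =
    (pvTW n_teams n_days days_off_per_turn n_days,
     pvDOFF n_teams n_days days_off_per_turn n_days) := by
  by_cases hnd : n_days ≤ 0
  · rw [PySem.List.pyRange_one_eq_nil hnd, List.foldl_nil,
      pvPhase1_zero n_teams n_days days_off_per_turn]
    rw [Prod.mk.injEq]
    constructor
    · apply PySem.Dict.ext
      rw [pvTW_items, pvTW_items]
      apply List.map_congr_left
      intro t _
      rw [PySem.List.pyRange_one_eq_nil hnd]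
      simp
    · rw [pvDOFF, pvDOFF, PySem.List.pyRange_one_eq_nil hnd]
      simp
  · rcases hpre with h | ⟨hnt, _⟩
    · omega
    · have h := pvPhase1 n_teams n_days days_off_per_turn (by omega) n_days.toNat (by omega)
      rw [Int.toNat_of_nonneg (by omega)] at h
      exact h

theorem pvTW_full (n_teams n_days days_off_per_turn : Int) :
    pvTW n_teams n_days days_off_per_turn n_days
    = PySem.Dict.mk ((PySem.List.pyRange 0 n_teams 1).map
        (fun t => (t, pvWRow n_teams n_days days_off_per_turn t))) := by
  apply PySem.Dict.ext
  rw [pvTW_items]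
  apply List.map_congr_left
  intro t _
  rw [Prod.mk.injEq]
  refine ⟨rfl, ?_⟩
  apply List.map_congr_left
  intro d hd
  rw [if_pos (PySem.List.mem_pyRange_one.mp hd).2]

theorem pvB_doff (n_teams n_days days_off_per_turn : Int) :
    (PySem.List.pyRange 0 n_days 1).map
      (fun day => [pvOffTeam n_teams days_off_per_turn day]) =
    pvDOFF n_teams n_days days_off_per_turn n_days := by
  rw [pvDOFF]
  apply List.map_congr_left
  intro d hd
  rw [if_pos (PySem.List.mem_pyRange_one.mp hd).2]

-- ===== VERDICT (by name: the statement is the Claim_ definition above) =====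
theorem generate_mariokart_schedule_spec : Claim_equal_generate_mariokart_schedule := by
  unfold Claim_equal_generate_mariokart_schedule
  intro n_teams n_days days_off_per_turn max_consec_days hdom hpre
  unfold Spec_generate_mariokart_schedule generate_mariokart_schedule generate_mariokart_schedule_alt
  simp only
  rw [pvA_ph1 n_teams n_days days_off_per_turn hpre]
  rw [pvTW_full n_teams n_days days_off_per_turn]
  have hAF := pvAFold n_teams n_days days_off_per_turn max_consec_days
    (PySem.List.pyRange 0 n_teams 1) [] (pvDOFF n_teams n_days days_off_per_turn n_days)
    (by simpa using PySem.List.nodup_pyRange_one 0 n_teams)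
  simp only [List.nil_append] at hAF
  rw [hAF]
  rw [pvB_doff n_teams n_days days_off_per_turn]
  have hBF := pvBFold n_teams n_days days_off_per_turn max_consec_days
    (PySem.List.pyRange 0 n_teams 1) [] (pvDOFF n_teams n_days days_off_per_turn n_days)
    (by simpa using PySem.List.nodup_pyRange_one 0 n_teams)
  simp only [List.nil_append] at hBF
  rw [show (PySem.Dict.empty : PySem.Dict Int (List Bool)) = PySem.Dict.mk [] from rfl, hBF]
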